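-- pv_equiv track=rewrite | github.com/stephanbals/hiddenedge | core/jobs/crawler_adapter.py | filter_by_queries
-- ===== SOURCE A (Python) =====
-- def filter_by_queries(raw_jobs, queries):
--
--     filtered = []
--
--     for job in raw_jobs:
--
--         title = (job.get("title") or "").lower()
--         description = (job.get("description") or "").lower()
--
--         text = f"{title} {description}"
--
--         if any(q.lower() in text for q in queries):
--             filtered.append(job)
--
--     return filtered
-- ===== SOURCE B (Python) =====
-- def filter_by_queries(raw_jobs, queries):
--     # Pass 1: precompute each job's searchable text once.
--     texts = [
--         f"{(job.get('title') or '').lower()} {(job.get('description') or '').lower()}"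
--         for job in raw_jobs
--     ]
--     # Pass 2: loop over QUERIES (outer), marking matching jobs in a boolean mask.
--     keep = [False] * len(raw_jobs)
--     for q in queries:
--         ql = q.lower()
--         keep = [k or ql in t for k, t in zip(keep, texts)]
--     # Pass 3: emit jobs in original order wherever the mask is set.
--     return [job for job, k in zip(raw_jobs, keep) if k]
-- ===== Notes on version B (the rewrite author's own statement) =====
-- stated objective: alternative
-- what changed: B inverts the loop nesting: instead of A's single pass over jobs with an inner any()-over-queries scan and an accumulator list, B precomputes all job texts, then iterates over queries (outer loop) updating a boolean mask over the jobs, and finally emits jobs selected by the mask; correct because substring-match-by-any-query is order-independent (a disjunction over queries), so marking per query yields the same set of jobs in original order.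
import Mathlib
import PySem

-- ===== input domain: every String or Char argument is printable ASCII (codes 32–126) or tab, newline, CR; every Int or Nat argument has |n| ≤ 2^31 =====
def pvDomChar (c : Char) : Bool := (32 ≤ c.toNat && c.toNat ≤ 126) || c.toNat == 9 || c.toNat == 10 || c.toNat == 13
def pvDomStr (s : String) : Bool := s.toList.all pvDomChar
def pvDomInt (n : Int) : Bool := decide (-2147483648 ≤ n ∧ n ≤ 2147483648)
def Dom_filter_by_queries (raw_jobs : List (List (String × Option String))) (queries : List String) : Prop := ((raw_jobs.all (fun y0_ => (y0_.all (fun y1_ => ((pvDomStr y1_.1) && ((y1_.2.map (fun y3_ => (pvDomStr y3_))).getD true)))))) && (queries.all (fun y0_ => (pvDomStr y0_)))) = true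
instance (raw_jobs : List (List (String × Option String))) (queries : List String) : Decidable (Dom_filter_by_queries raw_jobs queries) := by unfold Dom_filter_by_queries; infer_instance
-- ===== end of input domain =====

-- B inverts the loop nesting (queries outer, boolean mask over precomputed job texts) instead of
-- A's per-job inner any()-over-queries scan; alternative structure, same cost.

-- shared helper: (job.get(k) or "")  — None and a missing key both become ""
def pvField (job : List (String × Option String)) (k : String) : String :=
  match job.lookup k with
  | some (some s) => s
  | _ => ""

-- shared helper: f"{title} {description}" with both parts lowered
def pvText (job : List (String × Option String)) : String :=
  PySem.Str.join " " [PySem.Str.lower (pvField job "title"), PySem.Str.lower (pvField job "description")]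

-- ===== PORT A =====
def filter_by_queries (raw_jobs : List (List (String × Option String))) (queries : List String) : List (List (String × Option String)) :=
  raw_jobs.foldl (fun filtered job =>
    if queries.any (fun q => PySem.Str.isIn (PySem.Str.lower q) (pvText job)) then
      filtered ++ [job]
    else filtered) []

-- ===== PORT B =====
def filter_by_queries_alt (raw_jobs : List (List (String × Option String))) (queries : List String) : List (List (String × Option String)) :=
  let texts := raw_jobs.map pvText
  let keep := queries.foldl (fun keep q =>
      List.zipWith (fun k t => k || PySem.Str.isIn (PySem.Str.lower q) t) keep texts)
    (List.replicate raw_jobs.length false)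
  ((raw_jobs.zip keep).filter (fun p => p.2)).map Prod.fst

-- ===== PRECONDITION & SPEC =====
def Spec_filter_by_queries (raw_jobs : List (List (String × Option String))) (queries : List String) (out : List (List (String × Option String))) : Prop := out = filter_by_queries_alt raw_jobs queries
instance (raw_jobs : List (List (String × Option String))) (queries : List String) (out : List (List (String × Option String))) : Decidable (Spec_filter_by_queries raw_jobs queries out) := by unfold Spec_filter_by_queries; infer_instance

-- ===== CLAIM (what is proved, stated in full; the proofs are below) =====
def Claim_equal_filter_by_queries : Prop := ∀ (raw_jobs : List (List (String × Option String))) (queries : List String), Dom_filter_by_queries raw_jobs queries → Spec_filter_by_queries raw_jobs queries (filter_by_queries raw_jobs queries)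

-- ===== LEMMAS AND PROOFS =====

-- zipWith over a map of the same list is a map
theorem pv_zipWith_map_self {α β γ : Type} (f : β → α → γ) (g : α → β) (l : List α) :
    List.zipWith f (l.map g) l = l.map (fun x => f (g x) x) := by
  induction l with
  | nil => rfl
  | cons a l ih => simp [ih]

-- the mask after folding over queries: each slot is g t || ∃ query matching t
theorem pv_mask (texts : List String) (qs : List String) (g : String → Bool) :
    qs.foldl (fun keep q =>
        List.zipWith (fun k t => k || PySem.Str.isIn (PySem.Str.lower q) t) keep texts)
      (texts.map g)
    = texts.map (fun t => g t || qs.any (fun q => PySem.Str.isIn (PySem.Str.lower q) t)) := by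
  induction qs generalizing g with
  | nil => simp
  | cons q qs ih =>
    simp only [List.foldl_cons, pv_zipWith_map_self]
    rw [ih]
    simp [Bool.or_assoc]

-- zip-with-mask filter collapses back to a plain filter
theorem pv_zip_mask_filter {α : Type} (l : List α) (p : α → Bool) :
    (((l.zip (l.map p)).filter (fun pr => pr.2)).map Prod.fst) = l.filter p := by
  induction l with
  | nil => rfl
  | cons a l ih =>
    by_cases h : p a <;> simp [List.filter, h, ih]

-- ===== VERDICT (by name: the statement is the Claim_ definition above) =====
theorem filter_by_queries_spec : Claim_equal_filter_by_queries := by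
  intro raw_jobs queries _
  unfold Spec_filter_by_queries filter_by_queries filter_by_queries_alt
  rw [PySem.List.foldl_append_if_eq_filter]
  simp only [List.nil_append]
  have hrep : (List.replicate raw_jobs.length false)
      = (raw_jobs.map pvText).map (fun _ => false) := by
    simp
  rw [hrep, pv_mask, List.map_map]
  simp only [Function.comp_def, Bool.false_or]
  rw [pv_zip_mask_filter]
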